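-- pv_equiv track=rewrite | github.com/abhijithumesh/DSCI-553-Assignment6 | bfr.py | calculate_stat_information
-- ===== SOURCE A (Python) =====
-- def calculate_stat_information(index_list, idx_coordinates_map, dimension):
--
--     total_num = 0
--     some = [0 for val in range(dimension)]
--     sq_some = [0 for val in range(dimension)]
--
--     for index in index_list:
--         coordinates = idx_coordinates_map[index]
--
--         for val in range(0, dimension):
--             some[val] += coordinates[val]
--             sq_some[val] += pow(coordinates[val], 2)
--
--         total_num += 1
--
--     return (total_num, some, sq_some)
-- ===== SOURCE B (Python) =====
-- def calculate_stat_information(index_list, idx_coordinates_map, dimension):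
--     # Column-major: gather the vectors once, then one summing pass per dimension.
--     vectors = [idx_coordinates_map[i] for i in index_list]
--     some = [sum(v[j] for v in vectors) for j in range(dimension)]
--     sq_some = [sum(v[j] * v[j] for v in vectors) for j in range(dimension)]
--     return (len(vectors), some, sq_some)
-- ===== Notes on version B (the rewrite author's own statement) =====
-- stated objective: simpler
-- what changed: Row-by-row accumulation into mutable running lists is replaced by a column-major decomposition: collect the vectors once, then build each of the two statistics lists with one per-dimension summing comprehension; the empty case needs no special handling.
import Mathlib
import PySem

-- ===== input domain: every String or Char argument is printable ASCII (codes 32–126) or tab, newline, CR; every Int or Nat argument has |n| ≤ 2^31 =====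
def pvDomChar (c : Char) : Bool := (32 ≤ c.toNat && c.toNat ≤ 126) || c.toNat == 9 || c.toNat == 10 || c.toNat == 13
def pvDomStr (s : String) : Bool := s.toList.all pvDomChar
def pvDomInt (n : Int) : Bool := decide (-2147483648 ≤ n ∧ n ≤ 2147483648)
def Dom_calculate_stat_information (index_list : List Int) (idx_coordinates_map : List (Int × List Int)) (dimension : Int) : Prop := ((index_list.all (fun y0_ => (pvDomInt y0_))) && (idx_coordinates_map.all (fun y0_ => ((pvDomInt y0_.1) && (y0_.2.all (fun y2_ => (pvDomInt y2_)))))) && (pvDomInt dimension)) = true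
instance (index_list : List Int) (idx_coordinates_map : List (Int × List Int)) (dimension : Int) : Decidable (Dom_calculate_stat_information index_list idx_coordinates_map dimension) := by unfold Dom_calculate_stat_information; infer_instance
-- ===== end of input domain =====

-- B replaces A's row-by-row accumulation into mutable running lists by a column-major
-- decomposition (one summing pass per dimension); objective: simpler.

-- ===== PORT A =====
def calculate_stat_information (index_list : List Int) (idx_coordinates_map : List (Int × List Int)) (dimension : Int) : Int × List Int × List Int :=
  -- total_num = 0; some = [0]*dimension; sq_some = [0]*dimension; then the nested for-loops
  let some0 := (PySem.List.pyRange 0 dimension 1).map (fun _ => (0 : Int))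
  let sq0 := (PySem.List.pyRange 0 dimension 1).map (fun _ => (0 : Int))
  let st := index_list.foldl
    (fun (st : Int × List Int × List Int) index =>
      let coordinates := (idx_coordinates_map.lookup index).getD []   -- dict lookup; KeyError excluded by Pre_
      let inner := (PySem.List.pyRange 0 dimension 1).foldl
        (fun (p : List Int × List Int) val =>
          (PySem.List.pySetD p.1 val (PySem.List.pyGetD p.1 val 0 + PySem.List.pyGetD coordinates val 0),
           PySem.List.pySetD p.2 val (PySem.List.pyGetD p.2 val 0 + (PySem.List.pyGetD coordinates val 0) ^ 2)))
        (st.2.1, st.2.2)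
      (st.1 + 1, inner.1, inner.2))
    (0, some0, sq0)
  st

-- ===== PORT B =====
def calculate_stat_information_alt (index_list : List Int) (idx_coordinates_map : List (Int × List Int)) (dimension : Int) : Int × List Int × List Int :=
  let vectors := index_list.map (fun i => (idx_coordinates_map.lookup i).getD [])  -- dict lookup; KeyError excluded by Pre_
  let some := (PySem.List.pyRange 0 dimension 1).map
    (fun j => (vectors.map (fun v => PySem.List.pyGetD v j 0)).sum)
  let sq_some := (PySem.List.pyRange 0 dimension 1).map
    (fun j => (vectors.map (fun v => PySem.List.pyGetD v j 0 * PySem.List.pyGetD v j 0)).sum)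
  ((vectors.length : Int), some, sq_some)

-- ===== PRECONDITION & SPEC =====
-- Pre_ excludes exactly the inputs where Python A raises: an index absent from the dict
-- (KeyError) or a coordinate vector shorter than dimension (IndexError).
def Pre_calculate_stat_information (index_list : List Int) (idx_coordinates_map : List (Int × List Int)) (dimension : Int) : Prop :=
  ∀ i ∈ index_list, (idx_coordinates_map.lookup i).isSome = true ∧
    dimension ≤ (((idx_coordinates_map.lookup i).getD []).length : Int)
instance (index_list : List Int) (idx_coordinates_map : List (Int × List Int)) (dimension : Int) : Decidable (Pre_calculate_stat_information index_list idx_coordinates_map dimension) := by unfold Pre_calculate_stat_information; infer_instance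

def pvWitness_calculate_stat_information : List Int × (List (Int × List Int)) × Int := ([0, 1], [(0, [1, 2]), (1, [3, 4])], 2)

def Spec_calculate_stat_information (index_list : List Int) (idx_coordinates_map : List (Int × List Int)) (dimension : Int) (out : Int × List Int × List Int) : Prop := out = calculate_stat_information_alt index_list idx_coordinates_map dimension
instance (index_list : List Int) (idx_coordinates_map : List (Int × List Int)) (dimension : Int) (out : Int × List Int × List Int) : Decidable (Spec_calculate_stat_information index_list idx_coordinates_map dimension out) := by unfold Spec_calculate_stat_information; infer_instance

-- ===== CLAIM (what is proved, stated in full; the proofs are below) =====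
def Claim_equal_calculate_stat_information : Prop := ∀ (index_list : List Int) (idx_coordinates_map : List (Int × List Int)) (dimension : Int), Dom_calculate_stat_information index_list idx_coordinates_map dimension → Pre_calculate_stat_information index_list idx_coordinates_map dimension → Spec_calculate_stat_information index_list idx_coordinates_map dimension (calculate_stat_information index_list idx_coordinates_map dimension)

-- ===== LEMMAS AND PROOFS =====

lemma set_map_pyRange (d : Int) (h : Int → Int) (n : Nat) (hn : (n : Int) < d) (v : Int) :
    ((PySem.List.pyRange 0 d 1).map h).set n v
      = (PySem.List.pyRange 0 d 1).map (fun j => if j = (n : Int) then v else h j) := by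
  apply List.ext_getElem
  · simp
  · intro k h1 h2
    simp only [List.getElem_set, List.getElem_map, PySem.List.getElem_pyRange_one]
    by_cases hkn : k = n
    · subst hkn; simp
    · simp only [if_neg (fun hh => hkn hh.symm : ¬ n = k),
        if_neg (by omega : ¬ ((0 : Int) + (k : Int) = (n : Int)))]

lemma inner_fold_aux (d : Int) (c : List Int) (f g : Int → Int) (n : Nat) (hn : (n : Int) ≤ d) :
    (PySem.List.pyRange 0 (n : Int) 1).foldl
      (fun (p : List Int × List Int) val =>
        (PySem.List.pySetD p.1 val (PySem.List.pyGetD p.1 val 0 + PySem.List.pyGetD c val 0),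
         PySem.List.pySetD p.2 val (PySem.List.pyGetD p.2 val 0 + (PySem.List.pyGetD c val 0) ^ 2)))
      ((PySem.List.pyRange 0 d 1).map f, (PySem.List.pyRange 0 d 1).map g)
    = ((PySem.List.pyRange 0 d 1).map
         (fun j => if j < (n : Int) then f j + PySem.List.pyGetD c j 0 else f j),
       (PySem.List.pyRange 0 d 1).map
         (fun j => if j < (n : Int) then g j + (PySem.List.pyGetD c j 0) ^ 2 else g j)) := by
  induction n with
  | zero =>
    rw [show ((0 : Nat) : Int) = 0 from rfl, PySem.List.pyRange_one_eq_nil le_rfl]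
    simp only [List.foldl_nil]
    refine Prod.ext ?_ ?_ <;>
    · apply List.map_congr_left
      intro j hj
      have := (PySem.List.mem_pyRange_one).mp hj
      rw [if_neg (by omega)]
  | succ k ih =>
    have hk : (k : Int) ≤ d := by push_cast at hn ⊢; omega
    have hkd : (k : Int) < d := by push_cast at hn ⊢; omega
    rw [show ((k + 1 : Nat) : Int) = (k : Int) + 1 by push_cast; ring,
        PySem.List.pyRange_one_succ_right (by positivity), List.foldl_append, ih hk]
    simp only [List.foldl_cons, List.foldl_nil]
    have hget1 : PySem.List.pyGetD ((PySem.List.pyRange 0 d 1).map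
        (fun j => if j < (k : Int) then f j + PySem.List.pyGetD c j 0 else f j)) (k : Int) 0
        = f (k : Int) := by
      rw [PySem.List.pyGetD_map_pyRange_of_nonneg _ _ _ _ (by positivity) hkd, if_neg (by omega)]
    have hget2 : PySem.List.pyGetD ((PySem.List.pyRange 0 d 1).map
        (fun j => if j < (k : Int) then g j + (PySem.List.pyGetD c j 0) ^ 2 else g j)) (k : Int) 0
        = g (k : Int) := by
      rw [PySem.List.pyGetD_map_pyRange_of_nonneg _ _ _ _ (by positivity) hkd, if_neg (by omega)]
    simp only [hget1, hget2, PySem.List.pySetD_natCast, set_map_pyRange d _ k hkd]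
    refine Prod.ext ?_ ?_ <;>
    · apply List.map_congr_left
      intro j hj
      have := (PySem.List.mem_pyRange_one).mp hj
      by_cases hjk : j = (k : Int)
      · subst hjk; rw [if_pos rfl, if_pos (by omega)]
      · rw [if_neg hjk]
        by_cases hlt : j < (k : Int)
        · rw [if_pos hlt, if_pos (by omega)]
        · rw [if_neg hlt, if_neg (by omega)]

lemma inner_fold (d : Int) (c : List Int) (f g : Int → Int) :
    (PySem.List.pyRange 0 d 1).foldl
      (fun (p : List Int × List Int) val =>
        (PySem.List.pySetD p.1 val (PySem.List.pyGetD p.1 val 0 + PySem.List.pyGetD c val 0),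
         PySem.List.pySetD p.2 val (PySem.List.pyGetD p.2 val 0 + (PySem.List.pyGetD c val 0) ^ 2)))
      ((PySem.List.pyRange 0 d 1).map f, (PySem.List.pyRange 0 d 1).map g)
    = ((PySem.List.pyRange 0 d 1).map (fun j => f j + PySem.List.pyGetD c j 0),
       (PySem.List.pyRange 0 d 1).map (fun j => g j + (PySem.List.pyGetD c j 0) ^ 2)) := by
  by_cases hd : 0 ≤ d
  · have hcast : ((d.toNat : Int)) = d := Int.toNat_of_nonneg hd
    have h := inner_fold_aux d c f g d.toNat (le_of_eq hcast)
    rw [hcast] at h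
    rw [h]
    refine Prod.ext ?_ ?_ <;>
    · apply List.map_congr_left
      intro j hj
      have := (PySem.List.mem_pyRange_one).mp hj
      rw [if_pos (by omega)]
  · rw [PySem.List.pyRange_one_eq_nil (by omega)]
    simp

lemma outer_fold (m : List (Int × List Int)) (d : Int) (L : List Int) (t : Int) (f g : Int → Int) :
    L.foldl
      (fun (st : Int × List Int × List Int) index =>
        (st.1 + 1,
         ((PySem.List.pyRange 0 d 1).foldl
           (fun (p : List Int × List Int) val =>
             (PySem.List.pySetD p.1 val (PySem.List.pyGetD p.1 val 0 + PySem.List.pyGetD ((m.lookup index).getD []) val 0),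
              PySem.List.pySetD p.2 val (PySem.List.pyGetD p.2 val 0 + (PySem.List.pyGetD ((m.lookup index).getD []) val 0) ^ 2)))
           (st.2.1, st.2.2)).1,
         ((PySem.List.pyRange 0 d 1).foldl
           (fun (p : List Int × List Int) val =>
             (PySem.List.pySetD p.1 val (PySem.List.pyGetD p.1 val 0 + PySem.List.pyGetD ((m.lookup index).getD []) val 0),
              PySem.List.pySetD p.2 val (PySem.List.pyGetD p.2 val 0 + (PySem.List.pyGetD ((m.lookup index).getD []) val 0) ^ 2)))
           (st.2.1, st.2.2)).2))
      (t, (PySem.List.pyRange 0 d 1).map f, (PySem.List.pyRange 0 d 1).map g)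
    = (t + (L.length : Int),
       (PySem.List.pyRange 0 d 1).map
         (fun j => f j + (L.map (fun i => PySem.List.pyGetD ((m.lookup i).getD []) j 0)).sum),
       (PySem.List.pyRange 0 d 1).map
         (fun j => g j + (L.map (fun i => (PySem.List.pyGetD ((m.lookup i).getD []) j 0) ^ 2)).sum)) := by
  induction L generalizing t f g with
  | nil => simp
  | cons i L ih =>
    rw [List.foldl_cons]
    have hstep :
        (t + 1,
         ((PySem.List.pyRange 0 d 1).foldl
           (fun (p : List Int × List Int) val =>
             (PySem.List.pySetD p.1 val (PySem.List.pyGetD p.1 val 0 + PySem.List.pyGetD ((m.lookup i).getD []) val 0),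
              PySem.List.pySetD p.2 val (PySem.List.pyGetD p.2 val 0 + (PySem.List.pyGetD ((m.lookup i).getD []) val 0) ^ 2)))
           ((PySem.List.pyRange 0 d 1).map f, (PySem.List.pyRange 0 d 1).map g)).1,
         ((PySem.List.pyRange 0 d 1).foldl
           (fun (p : List Int × List Int) val =>
             (PySem.List.pySetD p.1 val (PySem.List.pyGetD p.1 val 0 + PySem.List.pyGetD ((m.lookup i).getD []) val 0),
              PySem.List.pySetD p.2 val (PySem.List.pyGetD p.2 val 0 + (PySem.List.pyGetD ((m.lookup i).getD []) val 0) ^ 2)))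
           ((PySem.List.pyRange 0 d 1).map f, (PySem.List.pyRange 0 d 1).map g)).2)
        = (t + 1,
           (PySem.List.pyRange 0 d 1).map (fun j => f j + PySem.List.pyGetD ((m.lookup i).getD []) j 0),
           (PySem.List.pyRange 0 d 1).map (fun j => g j + (PySem.List.pyGetD ((m.lookup i).getD []) j 0) ^ 2)) := by
      rw [inner_fold]
    rw [hstep, ih]
    refine Prod.ext (by simp only [List.length_cons]; push_cast; ring) (Prod.ext ?_ ?_) <;>
    · apply List.map_congr_left
      intro j hj
      simp only [List.map_cons, List.sum_cons]
      ring

-- ===== VERDICT (by name: the statement is the Claim_ definition above) =====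
theorem calculate_stat_information_spec : Claim_equal_calculate_stat_information := by
  intro index_list idx_coordinates_map dimension _ _
  unfold Spec_calculate_stat_information calculate_stat_information calculate_stat_information_alt
  simp only []
  rw [outer_fold idx_coordinates_map dimension index_list 0 (fun _ => 0) (fun _ => 0)]
  simp [List.map_map, pow_two, Function.comp_def]
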